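-- pv_equiv track=rewrite | github.com/WybeTuring/AfriHackWork | afrihack13.py | sort_array
-- ===== SOURCE A (Python) =====
-- def sort_array(source_array):
--     odd = []
--     positions = []
--     for i in range(0, len(source_array)):
--         if ( source_array[i] % 2 != 0):
--             odd.append(source_array[i])
--             positions.append(i)
--         odd.sort()
--     for i in range(0,len(odd)):
--         hold = positions[i]
--         source_array[hold] = odd[i]
--     return source_array
-- ===== SOURCE B (Python) =====
-- def sort_array(source_array):
--     # Online insertion sort over the odd-valued slots: stream the array once,
--     # inserting each odd value into place among the odd slots seen so far
--     # (displaced larger odds are carried one odd-slot to the right); evens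
--     # stay put.  No sorted()/sort call, no positions list, no extract phase.
--     result = []
--     for v in source_array:
--         if v % 2 == 0:
--             result.append(v)
--         else:
--             placed = []
--             for y in result:
--                 if y % 2 != 0 and v < y:
--                     placed.append(v)
--                     v = y
--                 else:
--                     placed.append(y)
--             placed.append(v)
--             result = placed
--     source_array[:] = result
--     return source_array
-- ===== Notes on version B (the rewrite author's own statement) =====
-- stated objective: alternative
-- what changed: Replaces A's extract-odds/sort/scatter-by-positions scheme with an online insertion sort: one streaming pass that inserts each odd value into place among the odd slots built so far (carrying displaced larger odds one odd-slot right), with no sort call, no positions list and no extraction phase.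
import Mathlib
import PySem

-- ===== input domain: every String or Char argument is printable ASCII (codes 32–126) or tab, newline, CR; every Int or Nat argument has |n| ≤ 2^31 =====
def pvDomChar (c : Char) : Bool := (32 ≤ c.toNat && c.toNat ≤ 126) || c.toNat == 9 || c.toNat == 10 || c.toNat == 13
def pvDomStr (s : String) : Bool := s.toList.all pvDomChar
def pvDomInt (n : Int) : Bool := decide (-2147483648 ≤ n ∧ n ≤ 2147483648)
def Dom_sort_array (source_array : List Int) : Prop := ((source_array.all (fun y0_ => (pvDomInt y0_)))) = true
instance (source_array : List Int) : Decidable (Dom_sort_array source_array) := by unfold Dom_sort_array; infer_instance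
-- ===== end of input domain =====

-- B replaces A's extract/sort/scatter-by-positions scheme with an online insertion sort over the
-- odd-valued slots (one streaming pass, no sort call, no positions list); objective: alternative.
-- Both Pythons mutate source_array in place to the same final content and return it; the theorem is about the returned value.


-- ===== PORT A =====
-- loop body of A's first 'for i in range(len(source_array))': append to odd/positions when odd, then odd.sort()
def sortStep (st : List Int × List Int) (p : Int × Int) : List Int × List Int :=
  let st' := if PySem.Int.mod p.2 2 ≠ 0 then (st.1 ++ [p.2], st.2 ++ [p.1]) else st
  (PySem.List.sorted st'.1 (fun x => x) false, st'.2)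

-- 'source_array[hold] = v': exact for 0 ≤ hold < len, the only indices A ever writes (hold comes from enumerate)
def pySetAt (arr : List Int) (i : Int) (v : Int) : List Int := arr.set i.toNat v

def sort_array (source_array : List Int) : List Int :=
  let st := (PySem.List.enumerate source_array 0).foldl sortStep ([], [])
  -- second loop: for i in range(len(odd)): source_array[positions[i]] = odd[i]
  (st.2.zip st.1).foldl (fun arr q => pySetAt arr q.1 q.2) source_array

-- ===== PORT B =====
-- B's inner loop: walk the result built so far with the carried value v, emitting; append the carry at the end
def oddInsert : List Int → Int → List Int
  | [], v => [v]
  | y :: ys, v => if PySem.Int.mod y 2 ≠ 0 ∧ v < y then v :: oddInsert ys y else y :: oddInsert ys v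

-- B's outer loop: stream the array once, evens appended as-is, odds inserted among the odd slots
def sort_array_alt (source_array : List Int) : List Int :=
  source_array.foldl
    (fun res v => if PySem.Int.mod v 2 = 0 then res ++ [v] else oddInsert res v) []

-- ===== PRECONDITION & SPEC =====
def Spec_sort_array (source_array : List Int) (out : List Int) : Prop := out = sort_array_alt source_array
instance (source_array : List Int) (out : List Int) : Decidable (Spec_sort_array source_array out) := by unfold Spec_sort_array; infer_instance

-- ===== CLAIM (what is proved, stated in full; the proofs are below) =====
def Claim_equal_sort_array : Prop := ∀ (source_array : List Int), Dom_sort_array source_array → Spec_sort_array source_array (sort_array source_array)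

-- ===== LEMMAS AND PROOFS =====

-- "place vs into the odd-valued slots of the list, in order": the common normal form of both programs
def pyPlace : List Int → List Int → List Int
  | [], _ => []
  | x :: xs, it =>
    if PySem.Int.mod x 2 ≠ 0 then
      match it with
      | v :: it' => v :: pyPlace xs it'
      | [] => x :: pyPlace xs []
    else x :: pyPlace xs it

-- the positions A records, expressed structurally (as Nats)
def oddPos : List Int → List Nat
  | [] => []
  | x :: xs => if PySem.Int.mod x 2 ≠ 0 then 0 :: (oddPos xs).map (· + 1) else (oddPos xs).map (· + 1)

-- structural equations for oddPos and pyPlace, used by the proofs below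
theorem oddPos_cons_odd (x : Int) (xs : List Int) (h : PySem.Int.mod x 2 ≠ 0) :
    oddPos (x :: xs) = 0 :: (oddPos xs).map (· + 1) := by
  simp only [oddPos]; rw [if_pos h]

theorem oddPos_cons_even (x : Int) (xs : List Int) (h : ¬ PySem.Int.mod x 2 ≠ 0) :
    oddPos (x :: xs) = (oddPos xs).map (· + 1) := by
  simp only [oddPos]; rw [if_neg h]

theorem pyPlace_cons_odd (x : Int) (xs : List Int) (v : Int) (it : List Int)
    (h : PySem.Int.mod x 2 ≠ 0) : pyPlace (x :: xs) (v :: it) = v :: pyPlace xs it := by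
  simp only [pyPlace]; rw [if_pos h]

theorem pyPlace_cons_odd_nil (x : Int) (xs : List Int) (h : PySem.Int.mod x 2 ≠ 0) :
    pyPlace (x :: xs) [] = x :: pyPlace xs [] := by
  simp only [pyPlace]; rw [if_pos h]

theorem pyPlace_cons_even (x : Int) (xs : List Int) (it : List Int) (h : ¬ PySem.Int.mod x 2 ≠ 0) :
    pyPlace (x :: xs) it = x :: pyPlace xs it := by
  simp only [pyPlace]; rw [if_neg h]

-- ---- A = pyPlace xs (sorted odds) ----

theorem foldA (l : List (Int × Int)) : ∀ (od ps : List Int),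
    l.foldl sortStep (PySem.List.sorted od (fun x => x) false, ps)
    = (PySem.List.sorted (od ++ (l.filter (fun p => decide (PySem.Int.mod p.2 2 ≠ 0))).map (·.2)) (fun x => x) false,
       ps ++ (l.filter (fun p => decide (PySem.Int.mod p.2 2 ≠ 0))).map (·.1)) := by
  induction l with
  | nil => intro od ps; simp
  | cons p l ih =>
    intro od ps
    rw [List.foldl_cons, List.filter_cons]
    by_cases h : PySem.Int.mod p.2 2 ≠ 0
    · have hs : PySem.List.sorted (PySem.List.sorted od (fun x => x) false ++ [p.2]) (fun x => x) false
          = PySem.List.sorted (od ++ [p.2]) (fun x => x) false :=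
        PySem.List.sorted_eq_sorted_of_perm _ _ _ Function.injective_id
          ((PySem.List.sorted_perm od (fun x => x) false).append_right [p.2])
      have hstep : sortStep (PySem.List.sorted od (fun x => x) false, ps) p
          = (PySem.List.sorted (od ++ [p.2]) (fun x => x) false, ps ++ [p.1]) := by
        unfold sortStep; rw [if_pos h]; exact Prod.ext hs rfl
      rw [if_pos (decide_eq_true h), hstep, ih (od ++ [p.2]) (ps ++ [p.1])]
      simp only [List.map_cons, List.append_assoc, List.singleton_append]
    · have hstep : sortStep (PySem.List.sorted od (fun x => x) false, ps) p
          = (PySem.List.sorted od (fun x => x) false, ps) := by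
        unfold sortStep; rw [if_neg h]; exact Prod.ext (PySem.List.sorted_sorted od (fun x => x)) rfl
      rw [if_neg (by simpa using h), hstep, ih od ps]

theorem enum_spec (xs : List Int) : ∀ (s : Int),
    (((PySem.List.enumerate xs s).filter (fun p => decide (PySem.Int.mod p.2 2 ≠ 0))).map (·.1)
      = (oddPos xs).map (fun n => s + Int.ofNat n))
    ∧ (((PySem.List.enumerate xs s).filter (fun p => decide (PySem.Int.mod p.2 2 ≠ 0))).map (·.2)
      = xs.filter (fun x => decide (PySem.Int.mod x 2 ≠ 0))) := by
  induction xs with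
  | nil => intro s; simp [PySem.List.enumerate_nil, oddPos]
  | cons x xs ih =>
    intro s
    rw [PySem.List.enumerate_cons, List.filter_cons, List.filter_cons]
    by_cases h : PySem.Int.mod x 2 ≠ 0
    · rw [if_pos (decide_eq_true h), if_pos (decide_eq_true h), oddPos_cons_odd x xs h]
      refine ⟨?_, ?_⟩
      · rw [List.map_cons, List.map_cons, (ih (s+1)).1, List.map_map]
        refine congrArg₂ List.cons (by simp) ?_
        apply List.map_congr_left; intro n _
        simp only [Function.comp_apply, Int.ofNat_eq_natCast]; push_cast; ring
      · rw [List.map_cons, (ih (s+1)).2]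
    · rw [if_neg (by simpa using h), if_neg (by simpa using h), oddPos_cons_even x xs h]
      refine ⟨?_, (ih (s+1)).2⟩
      rw [(ih (s+1)).1, List.map_map]
      apply List.map_congr_left; intro n _
      simp only [Function.comp_apply, Int.ofNat_eq_natCast]; push_cast; ring

theorem pyPlace_nil (xs : List Int) : pyPlace xs [] = xs := by
  induction xs with
  | nil => rfl
  | cons x xs ih =>
    by_cases h : PySem.Int.mod x 2 ≠ 0
    · rw [pyPlace_cons_odd_nil x xs h, ih]
    · rw [pyPlace_cons_even x xs [] h, ih]

theorem shift (l : List (Nat × Int)) : ∀ (x : Int) (xs : List Int),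
    (l.map (Prod.map (· + 1) id)).foldl (fun arr (q : Nat × Int) => arr.set q.1 q.2) (x :: xs)
    = x :: l.foldl (fun arr (q : Nat × Int) => arr.set q.1 q.2) xs := by
  induction l with
  | nil => intro x xs; rfl
  | cons q l ih =>
    intro x xs
    simp only [List.map_cons, List.foldl_cons, Prod.map, id, List.set_cons_succ, ih]

theorem place (xs : List Int) : ∀ (vs : List Int),
    ((oddPos xs).zip vs).foldl (fun arr (q : Nat × Int) => arr.set q.1 q.2) xs = pyPlace xs vs := by
  induction xs with
  | nil => intro vs; rfl
  | cons x xs ih =>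
    intro vs
    by_cases h : PySem.Int.mod x 2 ≠ 0
    · rw [oddPos_cons_odd x xs h]
      cases vs with
      | nil =>
        rw [pyPlace_cons_odd_nil x xs h, List.zip_nil_right, List.foldl_nil, pyPlace_nil]
      | cons v vs' =>
        rw [pyPlace_cons_odd x xs v vs' h, List.zip_cons_cons, List.foldl_cons,
          List.set_cons_zero, List.zip_map_left, shift, ih]
    · rw [oddPos_cons_even x xs h, pyPlace_cons_even x xs vs h, List.zip_map_left, shift, ih]

theorem A_norm (xs : List Int) :
    sort_array xs = pyPlace xs (PySem.List.sorted (xs.filter (fun x => decide (PySem.Int.mod x 2 ≠ 0))) (fun x => x) false) := by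
  unfold sort_array
  have h0 : (([], []) : List Int × List Int) = (PySem.List.sorted [] (fun x => x) false, []) := rfl
  rw [h0, foldA, (enum_spec xs 0).1, (enum_spec xs 0).2]
  simp only [List.nil_append]
  have hm : (oddPos xs).map (fun n => (0 : Int) + Int.ofNat n) = (oddPos xs).map (fun n => Int.ofNat n) := by
    apply List.map_congr_left; intro n _; ring
  rw [hm, List.zip_map_left, List.foldl_map]
  have hstep : (fun (arr : List Int) (q : Nat × Int) =>
        pySetAt arr (Prod.map (fun n => Int.ofNat n) id q).1 (Prod.map (fun n => Int.ofNat n) id q).2)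
      = fun arr (q : Nat × Int) => arr.set q.1 q.2 := by
    funext arr q; simp [pySetAt, Prod.map]
  rw [hstep, place]

-- ---- B = pyPlace xs (sorted odds) ----

-- plain ordered insert (strict-compare), the list-level meaning of B's inner loop
def ins (v : Int) : List Int → List Int
  | [] => [v]
  | s :: S => if v < s then v :: s :: S else s :: ins v S

def countOdd (l : List Int) : Nat := (l.filter (fun x => decide (PySem.Int.mod x 2 ≠ 0))).length

theorem ins_perm (v : Int) (S : List Int) : (ins v S).Perm (v :: S) := by
  induction S with
  | nil => exact List.Perm.refl _
  | cons s S ih =>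
    by_cases h : v < s
    · simp [ins, h]
    · simp only [ins, if_neg h]
      exact (ih.cons s).trans (List.Perm.swap v s S)

theorem ins_pairwise (v : Int) (S : List Int) (hS : S.Pairwise (· ≤ ·)) :
    (ins v S).Pairwise (· ≤ ·) := by
  induction S with
  | nil => simp [ins]
  | cons s S ih =>
    rcases List.pairwise_cons.mp hS with ⟨hs, hS'⟩
    by_cases h : v < s
    · simp only [ins, if_pos h]
      refine List.pairwise_cons.mpr ⟨?_, hS⟩
      intro y hy
      rcases List.mem_cons.mp hy with rfl | hy
      · exact le_of_lt h
      · exact le_trans (le_of_lt h) (hs y hy)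
    · simp only [ins, if_neg h]
      refine List.pairwise_cons.mpr ⟨?_, ih hS'⟩
      intro y hy
      rcases List.mem_cons.mp ((ins_perm v S).mem_iff.mp hy) with h' | h'
      · exact h' ▸ le_of_not_gt h
      · exact hs y h'

theorem ins_eq_cons (v : Int) (S : List Int) (hS : S.Pairwise (· ≤ ·))
    (hle : ∀ y ∈ S, v ≤ y) : ins v S = v :: S := by
  induction S with
  | nil => rfl
  | cons s S ih =>
    by_cases h : v < s
    · simp [ins, h]
    · have hvs : v ≤ s := hle s (List.mem_cons_self)
      have hsv : s = v := le_antisymm (le_of_not_gt h) hvs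
      rcases List.pairwise_cons.mp hS with ⟨_, hS'⟩
      simp only [ins, if_neg h]
      rw [ih hS' (fun y hy => hle y (List.mem_cons_of_mem s hy)), hsv]

theorem even_append (p : List Int) : ∀ (S : List Int) (v : Int),
    PySem.Int.mod v 2 = 0 → S.length = countOdd p →
    pyPlace p S ++ [v] = pyPlace (p ++ [v]) S := by
  induction p with
  | nil =>
    intro S v _ hlen
    cases S with
    | nil =>
      rw [List.nil_append, pyPlace_nil, pyPlace_nil]
      rfl
    | cons s S' => exact absurd hlen (by simp [countOdd])
  | cons x p ih =>
    intro S v hv hlen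
    by_cases h : PySem.Int.mod x 2 ≠ 0
    · have hc : countOdd (x :: p) = countOdd p + 1 := by
        unfold countOdd
        rw [List.filter_cons, if_pos (decide_eq_true h)]
        rfl
      cases S with
      | nil => rw [hc] at hlen; exact absurd hlen (by simp)
      | cons s S' =>
        simp only [List.cons_append]
        rw [pyPlace_cons_odd x p s S' h, pyPlace_cons_odd x (p ++ [v]) s S' h,
          List.cons_append, ih S' v hv (by
            rw [hc] at hlen
            exact Nat.succ_injective (by simpa using hlen))]
    · have hc : countOdd (x :: p) = countOdd p := by
        unfold countOdd
        rw [List.filter_cons, if_neg (by simpa using h)]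
      simp only [List.cons_append]
      rw [pyPlace_cons_even x p S h, pyPlace_cons_even x (p ++ [v]) S h,
        List.cons_append, ih S v hv (hlen.trans hc)]

theorem odd_append (p : List Int) : ∀ (S : List Int) (v w : Int),
    PySem.Int.mod v 2 ≠ 0 → PySem.Int.mod w 2 ≠ 0 →
    S.Pairwise (· ≤ ·) → (∀ y ∈ S, PySem.Int.mod y 2 ≠ 0) → S.length = countOdd p →
    oddInsert (pyPlace p S) v = pyPlace (p ++ [w]) (ins v S) := by
  induction p with
  | nil =>
    intro S v w hv hw _ _ hlen
    cases S with
    | nil =>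
      rw [List.nil_append, show ins v [] = [v] from rfl,
        pyPlace_cons_odd w [] v [] hw, pyPlace_nil]
      rfl
    | cons s S' => exact absurd hlen (by simp [countOdd])
  | cons x p ih =>
    intro S v w hv hw hsort hodd hlen
    by_cases h : PySem.Int.mod x 2 ≠ 0
    · have hc : countOdd (x :: p) = countOdd p + 1 := by
        unfold countOdd
        rw [List.filter_cons, if_pos (decide_eq_true h)]
        rfl
      cases S with
      | nil => rw [hc] at hlen; exact absurd hlen (by simp)
      | cons s S' =>
        have hs_odd : PySem.Int.mod s 2 ≠ 0 := hodd s (List.mem_cons_self)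
        rcases List.pairwise_cons.mp hsort with ⟨hs_le, hS'sort⟩
        have hS'odd : ∀ y ∈ S', PySem.Int.mod y 2 ≠ 0 :=
          fun y hy => hodd y (List.mem_cons_of_mem s hy)
        have hlen' : S'.length = countOdd p := by
          rw [hc] at hlen
          exact Nat.succ_injective (by simpa using hlen)
        rw [pyPlace_cons_odd x p s S' h]
        by_cases hlt : v < s
        · simp only [oddInsert]
          rw [if_pos (show PySem.Int.mod s 2 ≠ 0 ∧ v < s from ⟨hs_odd, hlt⟩)]
          simp only [ins]
          rw [if_pos hlt]
          simp only [List.cons_append]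
          rw [pyPlace_cons_odd x (p ++ [w]) v (s :: S') h]
          rw [ih S' s w hs_odd hw hS'sort hS'odd hlen',
            ins_eq_cons s S' hS'sort hs_le]
        · have hcond : ¬ (PySem.Int.mod s 2 ≠ 0 ∧ v < s) := fun hcc => hlt hcc.2
          simp only [oddInsert]
          rw [if_neg hcond]
          simp only [ins]
          rw [if_neg hlt]
          simp only [List.cons_append]
          rw [pyPlace_cons_odd x (p ++ [w]) s (ins v S') h,
            ih S' v w hv hw hS'sort hS'odd hlen']
    · have hc : countOdd (x :: p) = countOdd p := by
        unfold countOdd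
        rw [List.filter_cons, if_neg (by simpa using h)]
      have hx_even : ¬ (PySem.Int.mod x 2 ≠ 0 ∧ v < x) := fun hcc => h hcc.1
      rw [pyPlace_cons_even x p S h]
      simp only [oddInsert]
      rw [if_neg hx_even]
      simp only [List.cons_append]
      rw [pyPlace_cons_even x (p ++ [w]) (ins v S) h,
        ih S v w hv hw hsort hodd (hlen.trans hc)]

-- the sorted odd multiset B has built after the prefix processed so far
def oddState (xs : List Int) : List Int :=
  xs.foldl (fun S v => if PySem.Int.mod v 2 = 0 then S else ins v S) []

theorem B_inv (xs : List Int) :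
    sort_array_alt xs = pyPlace xs (oddState xs)
    ∧ (oddState xs).Pairwise (· ≤ ·)
    ∧ (∀ y ∈ oddState xs, PySem.Int.mod y 2 ≠ 0)
    ∧ (oddState xs).Perm (xs.filter (fun x => decide (PySem.Int.mod x 2 ≠ 0))) := by
  induction xs using List.reverseRecOn with
  | nil => exact ⟨rfl, List.Pairwise.nil, by simp [oddState], List.Perm.refl _⟩
  | append_singleton p v ih =>
    rcases ih with ⟨hval, hsort, hodd, hperm⟩
    have hlen : (oddState p).length = countOdd p := by
      simpa [countOdd] using hperm.length_eq
    have haltstep : sort_array_alt (p ++ [v])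
        = (if PySem.Int.mod v 2 = 0 then sort_array_alt p ++ [v] else oddInsert (sort_array_alt p) v) := by
      simp only [sort_array_alt, List.foldl_append, List.foldl_cons, List.foldl_nil]
    have hstatestep : oddState (p ++ [v])
        = (if PySem.Int.mod v 2 = 0 then oddState p else ins v (oddState p)) := by
      simp only [oddState, List.foldl_append, List.foldl_cons, List.foldl_nil]
    by_cases hv : PySem.Int.mod v 2 = 0
    · rw [haltstep, hstatestep, if_pos hv, if_pos hv]
      refine ⟨?_, hsort, hodd, ?_⟩
      · rw [hval, even_append p (oddState p) v hv hlen]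
      · have h1 : List.filter (fun x => decide (PySem.Int.mod x 2 ≠ 0)) [v] = [] := by
          rw [List.filter_cons, if_neg (by simpa using hv)]
          rfl
        rw [List.filter_append, h1, List.append_nil]
        exact hperm
    · rw [haltstep, hstatestep, if_neg hv, if_neg hv]
      refine ⟨?_, ins_pairwise v _ hsort, ?_, ?_⟩
      · rw [hval, odd_append p (oddState p) v v hv hv hsort hodd hlen]
      · intro y hy
        rcases List.mem_cons.mp ((ins_perm v (oddState p)).mem_iff.mp hy) with h' | h'
        · exact h' ▸ hv
        · exact hodd y h'
      · rw [List.filter_append]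
        have h1 : (List.filter (fun x => decide (PySem.Int.mod x 2 ≠ 0)) [v]) = [v] := by
          rw [List.filter_cons, if_pos (decide_eq_true hv)]
          rfl
        rw [h1]
        exact (ins_perm v (oddState p)).trans
          ((hperm.cons v).trans (List.perm_append_singleton v _).symm)

theorem B_norm (xs : List Int) :
    sort_array_alt xs = pyPlace xs (PySem.List.sorted (xs.filter (fun x => decide (PySem.Int.mod x 2 ≠ 0))) (fun x => x) false) := by
  rcases B_inv xs with ⟨hval, hsort, _, hperm⟩
  rw [hval]
  exact congrArg (pyPlace xs) (PySem.List.sorted_id_eq_of_perm_of_pairwise _ _ hperm hsort).symm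

-- ===== VERDICT (by name: the statement is the Claim_ definition above) =====
theorem sort_array_spec : Claim_equal_sort_array := by
  intro src _
  show sort_array src = sort_array_alt src
  rw [A_norm, B_norm]
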